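-- pv_equiv track=rewrite | github.com/Anushka-Sharma-008/PythonDSA | practice/14_InvertedHollowRightTriangle.py | generate_hollow_inverted_right_angled_triangle
-- ===== SOURCE A (Python) =====
-- def generate_hollow_inverted_right_angled_triangle(n):
--     """
--     Function to return a hollow inverted right-angled triangle of '*' of side n as a list of strings.
--
--     Parameters:
--     n (int): The height of the triangle.
--
--     Returns:
--     list: A list of strings where each string represents a row of the triangle.
--     """
--     triangle = []
--     for i in range (n, 0, -1):
--         if (i == n) or (i == 1):
--             triangle.append('*' * i)
--         else:
--             spaces = ' ' * (i-2)
--             triangle.append('*' + spaces + '*')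
--     return triangle
-- ===== SOURCE B (Python) =====
-- def generate_hollow_inverted_right_angled_triangle(n):
--     rows = []
--     for i in range(n, 0, -1):
--         solid = i == n or i == 1
--         rows.append(''.join(['*' if solid or j == 0 or j == i - 1 else ' '
--                              for j in range(i)]))
--     return rows
-- ===== Notes on version B (the rewrite author's own statement) =====
-- stated objective: alternative
-- what changed: B replaces A's whole-row string formulas ('*'*i and '*'+spaces+'*' chosen by a first/last branch) with a per-cell construction: a nested comprehension tests each (row,column) cell against a border predicate and joins the characters.
import Mathlib
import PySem

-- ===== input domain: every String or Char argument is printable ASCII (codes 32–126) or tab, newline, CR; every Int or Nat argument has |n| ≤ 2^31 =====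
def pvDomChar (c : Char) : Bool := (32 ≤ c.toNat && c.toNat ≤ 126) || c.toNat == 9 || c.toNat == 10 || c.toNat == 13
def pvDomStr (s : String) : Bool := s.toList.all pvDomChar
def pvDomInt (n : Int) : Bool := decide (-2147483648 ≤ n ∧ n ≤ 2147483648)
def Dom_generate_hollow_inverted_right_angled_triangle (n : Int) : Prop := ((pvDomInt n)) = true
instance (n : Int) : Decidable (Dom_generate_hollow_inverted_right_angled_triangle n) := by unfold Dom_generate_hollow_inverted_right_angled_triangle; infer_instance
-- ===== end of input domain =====

-- B drops A's whole-row formulas and first/last branch: each row is built cell by cell from a border predicate on (row, column) — an alternative per-cell decomposition.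

-- ===== PORT A =====
def generate_hollow_inverted_right_angled_triangle (n : Int) : List String :=
  (PySem.List.pyRange n 0 (-1)).foldl
    (fun triangle i =>
      triangle ++ [if i == n || i == 1 then
          String.ofList (List.replicate i.toNat '*')
        else
          String.ofList (['*'] ++ List.replicate (i - 2).toNat ' ' ++ ['*'])])
    []

-- ===== PORT B =====
def generate_hollow_inverted_right_angled_triangle_alt (n : Int) : List String :=
  (PySem.List.pyRange n 0 (-1)).foldl
    (fun rows i =>
      let solid := i == n || i == 1
      rows ++ [String.ofList ((PySem.List.pyRange 0 i 1).map fun j =>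
        if solid || j == 0 || j == i - 1 then '*' else ' ')])
    []

-- ===== PRECONDITION & SPEC =====
def Spec_generate_hollow_inverted_right_angled_triangle (n : Int) (out : List String) : Prop := out = generate_hollow_inverted_right_angled_triangle_alt n
instance (n : Int) (out : List String) : Decidable (Spec_generate_hollow_inverted_right_angled_triangle n out) := by unfold Spec_generate_hollow_inverted_right_angled_triangle; infer_instance

-- ===== CLAIM (what is proved, stated in full; the proofs are below) =====
def Claim_equal_generate_hollow_inverted_right_angled_triangle : Prop := ∀ (n : Int), Dom_generate_hollow_inverted_right_angled_triangle n → Spec_generate_hollow_inverted_right_angled_triangle n (generate_hollow_inverted_right_angled_triangle n)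

-- ===== LEMMAS AND PROOFS =====

-- A row of A equals the corresponding per-cell row of B, for every width i the loop visits.
lemma row_eq (n i : Int) (h1 : 0 < i) (_h2 : i ≤ n) :
    (if i == n || i == 1 then
        String.ofList (List.replicate i.toNat '*')
      else
        String.ofList (['*'] ++ List.replicate (i - 2).toNat ' ' ++ ['*']))
    = String.ofList ((PySem.List.pyRange 0 i 1).map fun j =>
        if i == n || i == 1 || j == 0 || j == i - 1 then '*' else ' ') := by
  by_cases hs : i = n ∨ i = 1
  · -- solid row: the first two disjuncts make every cell '*'
    have hb : (i == n || i == 1) = true := by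
      rcases hs with h | h <;> simp [h]
    rw [if_pos hb]
    congr 1
    symm
    rw [List.eq_replicate_iff]
    refine ⟨by rw [List.length_map, PySem.List.length_pyRange_one]; omega, ?_⟩
    intro c hc
    obtain ⟨j, _, rfl⟩ := List.mem_map.mp hc
    simp [hb]
  · -- hollow row: border cells at j = 0 and j = i-1, spaces between
    obtain ⟨hne, h1'⟩ := not_or.mp hs
    rw [if_neg (by simp [hne, h1'])]
    congr 1
    rw [PySem.List.pyRange_one_cons h1]
    have hsplit : PySem.List.pyRange 1 i 1 = PySem.List.pyRange 1 (i-1) 1 ++ [i-1] := by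
      have : i = (i - 1) + 1 := by omega
      rw [this, PySem.List.pyRange_one_succ_right (by omega)]
      norm_num
    norm_num only
    rw [hsplit]
    simp only [List.map_cons, List.map_append, List.map_cons, List.map_nil]
    have hmid : (PySem.List.pyRange 1 (i-1) 1).map (fun j =>
        if i == n || i == 1 || j == 0 || j == i - 1 then '*' else ' ')
        = List.replicate (i - 2).toNat ' ' := by
      rw [List.eq_replicate_iff]
      refine ⟨by rw [List.length_map, PySem.List.length_pyRange_one]; omega, ?_⟩
      intro c hc
      obtain ⟨j, hj, rfl⟩ := List.mem_map.mp hc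
      obtain ⟨hj1, hj2⟩ := PySem.List.mem_pyRange_one.mp hj
      have : (i == n || i == 1 || j == 0 || j == i - 1) = false := by
        simp only [Bool.or_eq_false_iff, beq_eq_false_iff_ne]
        refine ⟨⟨⟨hne, h1'⟩, by omega⟩, by omega⟩
      rw [this]; simp
    rw [hmid]
    simp

-- ===== VERDICT (by name: the statement is the Claim_ definition above) =====
theorem generate_hollow_inverted_right_angled_triangle_spec : Claim_equal_generate_hollow_inverted_right_angled_triangle := by
  intro n _hdom
  unfold Spec_generate_hollow_inverted_right_angled_triangle
  unfold generate_hollow_inverted_right_angled_triangle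
  rw [PySem.List.foldl_append_singleton_eq_map, List.nil_append]
  unfold generate_hollow_inverted_right_angled_triangle_alt
  rw [PySem.List.foldl_append_singleton_eq_map, List.nil_append]
  apply List.map_congr_left
  intro i hi
  obtain ⟨h1, h2⟩ := PySem.List.mem_pyRange_neg_one.mp hi
  exact row_eq n i h1 h2
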